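-- pv_equiv track=rewrite | github.com/argiacomi/StereoCrafter | inpainting_inference.py | max_supported_tile_num
-- ===== SOURCE A (Python) =====
-- def spatial_tile_shape(height, width, tile_num, tile_overlap=(128, 128)):
--     tile_size = (
--         int((height + tile_overlap[0] * (tile_num - 1)) / tile_num),
--         int((width + tile_overlap[1] * (tile_num - 1)) / tile_num),
--     )
--     # Round tile sizes up to the nearest multiple of 8 so they satisfy the
--     # VAE's spatial compression requirement (height % 8 == 0, width % 8 == 0).
--     tile_size = (
--         ((tile_size[0] + 7) // 8) * 8,
--         ((tile_size[1] + 7) // 8) * 8,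
--     )
--     tile_stride = (tile_size[0] - tile_overlap[0], tile_size[1] - tile_overlap[1])
--     return tile_size, tile_stride
--
-- def max_supported_tile_num(height, width, tile_overlap=(128, 128)):
--     # Each tile contributes tile_stride pixels of unique content. When the
--     # stride shrinks below the minimum, additional tiles are degenerate —
--     # mostly overlap with negligible new information and wasted pipeline calls.
--     min_stride = (
--         max(1, tile_overlap[0] // 2),
--         max(1, tile_overlap[1] // 2),
--     )
--     tile_num = 1
--     while True:
--         tile_size, tile_stride = spatial_tile_shape(height, width, tile_num, tile_overlap)
--         if tile_stride[0] < min_stride[0] or tile_stride[1] < min_stride[1]: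
--             return max(1, tile_num - 1)
--         # After rounding up, tiles must still fit within the frame.
--         if tile_size[0] > height or tile_size[1] > width:
--             return max(1, tile_num - 1)
--         # The last tile's start must fall within the frame.
--         last_start_h = (tile_num - 1) * tile_stride[0]
--         last_start_w = (tile_num - 1) * tile_stride[1]
--         if last_start_h >= height or last_start_w >= width:
--             return max(1, tile_num - 1)
--         tile_num += 1
-- ===== SOURCE B (Python) =====
-- def _dim_tiles(dim, overlap):
--     # Largest tile count supported along a single dimension: first n at which
--     # the tile degenerates (stride too small, tile too big, or the last tile
--     # starts outside the frame) ends the search; clamp to at least 1.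
--     min_stride = max(1, overlap // 2)
--     n = 1
--     while True:
--         tile_size = ((int((dim + overlap * (n - 1)) / n) + 7) // 8) * 8
--         stride = tile_size - overlap
--         if stride < min_stride or tile_size > dim or (n - 1) * stride >= dim:
--             return max(1, n - 1)
--         n += 1
--
-- def max_supported_tile_num(height, width, tile_overlap=(128, 128)):
--     # The two spatial dimensions are independent: the combined search stops at
--     # the first n failing in either dimension, so the answer is the min of the
--     # per-dimension answers.
--     return min(_dim_tiles(height, tile_overlap[0]),
--                _dim_tiles(width, tile_overlap[1]))
-- ===== Notes on version B (the rewrite author's own statement) =====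
-- stated objective: simpler
-- what changed: Replaces the single combined while-loop over paired (height,width) state with a one-dimensional helper searched independently per dimension and combined with min, exact because the combined loop stops at the first failure in either dimension.
import Mathlib
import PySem

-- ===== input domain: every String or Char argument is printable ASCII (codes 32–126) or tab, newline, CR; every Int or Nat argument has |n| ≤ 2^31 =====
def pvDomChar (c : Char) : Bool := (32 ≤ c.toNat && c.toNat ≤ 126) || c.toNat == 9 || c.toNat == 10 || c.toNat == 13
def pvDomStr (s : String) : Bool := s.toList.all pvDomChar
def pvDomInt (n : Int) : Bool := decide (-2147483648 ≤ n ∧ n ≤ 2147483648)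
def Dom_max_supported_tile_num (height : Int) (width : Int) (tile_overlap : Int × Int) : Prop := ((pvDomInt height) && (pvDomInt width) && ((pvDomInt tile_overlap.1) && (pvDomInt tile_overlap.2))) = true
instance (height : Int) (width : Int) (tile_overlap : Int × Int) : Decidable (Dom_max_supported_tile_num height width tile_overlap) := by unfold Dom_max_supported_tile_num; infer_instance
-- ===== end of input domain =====

-- B searches the two spatial dimensions independently with a one-dimensional loop and
-- combines the results with min (objective: simpler decomposition; same cost as A).
-- `int((dim + overlap*(n-1))/n)` (float true division then int()) equals truncating
-- integer division `Int.tdiv` on every state the loops reach within Dom (the numerator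
-- magnitude stays far below 2^53, where float division rounds past no integer), so both
-- ports use Int.tdiv; this is exact on the stated domain.

-- ===== PORT A =====
-- ((x + 7) // 8) * 8, Python floor division
def pvCeil8 (x : Int) : Int := PySem.Int.floordiv (x + 7) 8 * 8

-- the `while True` loop of A; `fuel` is only a termination guard, chosen large enough
-- to be unreachable (each continuing iteration has stride ≥ 1, so tile_num ≤ height)
def pvLoopA (height width oh ow : Int) : Nat → Int → Int
  | 0, tile_num => max 1 (tile_num - 1)
  | fuel + 1, tile_num =>
    let tsh := pvCeil8 (Int.tdiv (height + oh * (tile_num - 1)) tile_num)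
    let tsw := pvCeil8 (Int.tdiv (width + ow * (tile_num - 1)) tile_num)
    let strh := tsh - oh
    let strw := tsw - ow
    if strh < max 1 (PySem.Int.floordiv oh 2) ∨ strw < max 1 (PySem.Int.floordiv ow 2) then
      max 1 (tile_num - 1)
    else if tsh > height ∨ tsw > width then
      max 1 (tile_num - 1)
    else if (tile_num - 1) * strh ≥ height ∨ (tile_num - 1) * strw ≥ width then
      max 1 (tile_num - 1)
    else
      pvLoopA height width oh ow fuel (tile_num + 1)

def max_supported_tile_num (height : Int) (width : Int) (tile_overlap : Int × Int) : Int :=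
  pvLoopA height width tile_overlap.1 tile_overlap.2 (height.toNat + width.toNat + 2) 1

-- ===== PORT B =====
-- _dim_tiles of Source B: the single-dimension while-loop (same unreachable fuel guard)
def pvDimLoop (dim overlap : Int) : Nat → Int → Int
  | 0, n => max 1 (n - 1)
  | fuel + 1, n =>
    let tile_size := pvCeil8 (Int.tdiv (dim + overlap * (n - 1)) n)
    let stride := tile_size - overlap
    if stride < max 1 (PySem.Int.floordiv overlap 2) ∨ tile_size > dim ∨ (n - 1) * stride ≥ dim then
      max 1 (n - 1)
    else
      pvDimLoop dim overlap fuel (n + 1)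

def max_supported_tile_num_alt (height : Int) (width : Int) (tile_overlap : Int × Int) : Int :=
  min (pvDimLoop height tile_overlap.1 (height.toNat + width.toNat + 2) 1)
      (pvDimLoop width tile_overlap.2 (height.toNat + width.toNat + 2) 1)

-- ===== PRECONDITION & SPEC =====
def Spec_max_supported_tile_num (height : Int) (width : Int) (tile_overlap : Int × Int) (out : Int) : Prop := out = max_supported_tile_num_alt height width tile_overlap
instance (height : Int) (width : Int) (tile_overlap : Int × Int) (out : Int) : Decidable (Spec_max_supported_tile_num height width tile_overlap out) := by unfold Spec_max_supported_tile_num; infer_instance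

-- ===== CLAIM (what is proved, stated in full; the proofs are below) =====
def Claim_equal_max_supported_tile_num : Prop := ∀ (height : Int) (width : Int) (tile_overlap : Int × Int), Dom_max_supported_tile_num height width tile_overlap → Spec_max_supported_tile_num height width tile_overlap (max_supported_tile_num height width tile_overlap)

-- ===== LEMMAS AND PROOFS =====

-- the one-dimensional loop never returns less than its clamped current count
theorem pvDimLoop_ge (dim overlap : Int) :
    ∀ (fuel : Nat) (n : Int), max 1 (n - 1) ≤ pvDimLoop dim overlap fuel n := by
  intro fuel
  induction fuel with
  | zero => intro n; simp [pvDimLoop]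
  | succ f ih =>
    intro n
    simp only [pvDimLoop]
    split
    · exact le_refl _
    · exact le_trans (max_le_max (le_refl 1) (by omega)) (ih (n + 1))

-- the combined loop returns the min of the two one-dimensional loops (same fuel)
theorem pvLoopA_eq_min (height width oh ow : Int) :
    ∀ (fuel : Nat) (n : Int),
      pvLoopA height width oh ow fuel n =
        min (pvDimLoop height oh fuel n) (pvDimLoop width ow fuel n) := by
  intro fuel
  induction fuel with
  | zero => intro n; simp [pvLoopA, pvDimLoop]
  | succ f ih =>
    intro n
    simp only [pvLoopA, pvDimLoop]
    by_cases hh : pvCeil8 (Int.tdiv (height + oh * (n - 1)) n) - oh < max 1 (PySem.Int.floordiv oh 2) ∨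
        pvCeil8 (Int.tdiv (height + oh * (n - 1)) n) > height ∨
        (n - 1) * (pvCeil8 (Int.tdiv (height + oh * (n - 1)) n) - oh) ≥ height <;>
      by_cases hw : pvCeil8 (Int.tdiv (width + ow * (n - 1)) n) - ow < max 1 (PySem.Int.floordiv ow 2) ∨
        pvCeil8 (Int.tdiv (width + ow * (n - 1)) n) > width ∨
        (n - 1) * (pvCeil8 (Int.tdiv (width + ow * (n - 1)) n) - ow) ≥ width
    · -- both dimensions fail: every branch returns max 1 (n-1)
      rw [if_pos hh, if_pos hw, min_self]
      rcases hh with h1 | h1 | h1 <;> split_ifs <;> first | rfl | tauto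
    · -- only height fails
      rw [if_pos hh, if_neg hw]
      have hb : max 1 (n - 1) ≤ pvDimLoop width ow f (n + 1) :=
        le_trans (max_le_max (le_refl 1) (by omega)) (pvDimLoop_ge width ow f (n + 1))
      rw [min_eq_left hb]
      rcases hh with h1 | h1 | h1 <;> split_ifs <;> first | rfl | tauto
    · -- only width fails
      rw [if_neg hh, if_pos hw]
      have hb : max 1 (n - 1) ≤ pvDimLoop height oh f (n + 1) :=
        le_trans (max_le_max (le_refl 1) (by omega)) (pvDimLoop_ge height oh f (n + 1))
      rw [min_eq_right hb]
      rcases hw with h2 | h2 | h2 <;> split_ifs <;> first | rfl | tauto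
    · -- neither fails: both recurse
      rw [if_neg hh, if_neg hw]
      push Not at hh hw
      rw [if_neg (by omega), if_neg (by omega), if_neg (by omega)]
      exact ih (n + 1)

-- ===== VERDICT (by name: the statement is the Claim_ definition above) =====
theorem max_supported_tile_num_spec : Claim_equal_max_supported_tile_num := by
  intro height width tile_overlap _
  unfold Spec_max_supported_tile_num max_supported_tile_num max_supported_tile_num_alt
  exact pvLoopA_eq_min height width tile_overlap.1 tile_overlap.2 _ 1
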